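-- pv_equiv track=rewrite | github.com/sdenton11/bball | Splits/process_data.py | create_player_list
-- ===== SOURCE A (Python) =====
-- def create_player_list(names):
--     """
--     Create a function to better format the list of players. The input will be a list of names with commas seperating players.
--     For example: ['daniel,', 'steph', 'curry'] => ['daniel', 'steph curry']
--     """
--     if names is None:
--         return None
--
--     # Iterate through the list of names
--     final_list = []
--     cur_name = []
--     for name in names:
--         has_comma = ',' == name[-1]
--         # Remove the comma if it's there
--         cur_name.append(name.replace(',', ''))
--
--         # If there is a comma then create the final name
--         if has_comma:
--             final_list.append(' '.join(cur_name))
--             cur_name = []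
--
--     # Add the name that didn't have a comma
--     final_list.append(' '.join(cur_name))
--
--     return final_list
-- ===== SOURCE B (Python) =====
-- def create_player_list(names):
--     if names is None:
--         return None
--
--     # Pass 1: clean every token and record the indices that end a full name.
--     cleaned = []
--     boundaries = []
--     for i, name in enumerate(names):
--         if name[-1] == ',':
--             boundaries.append(i)
--         cleaned.append(name.replace(',', ''))
--
--     # Pass 2: slice the cleaned tokens between consecutive boundaries.
--     final_list = []
--     prev = 0
--     for b in boundaries:
--         final_list.append(' '.join(cleaned[prev:b + 1]))
--         prev = b + 1
--     final_list.append(' '.join(cleaned[prev:]))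
--     return final_list
-- ===== Notes on version B (the rewrite author's own statement) =====
-- stated objective: alternative
-- what changed: A accumulates a running current-name buffer and flushes it at each comma inside one loop; B first builds the cleaned tokens and the list of boundary indices, then forms the groups in a second pass by slicing between consecutive boundaries.
import Mathlib
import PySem

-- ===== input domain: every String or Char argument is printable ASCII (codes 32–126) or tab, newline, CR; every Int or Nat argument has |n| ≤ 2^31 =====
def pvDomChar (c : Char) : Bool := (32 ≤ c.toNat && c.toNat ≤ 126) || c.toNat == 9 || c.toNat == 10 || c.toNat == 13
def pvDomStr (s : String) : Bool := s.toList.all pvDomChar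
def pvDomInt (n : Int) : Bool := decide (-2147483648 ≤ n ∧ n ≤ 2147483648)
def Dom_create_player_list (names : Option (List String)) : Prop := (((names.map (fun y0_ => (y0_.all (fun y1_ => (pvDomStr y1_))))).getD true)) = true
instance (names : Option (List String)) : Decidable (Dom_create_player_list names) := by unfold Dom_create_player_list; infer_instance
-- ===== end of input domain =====

-- B replaces A's single loop with a running buffer by two passes: clean tokens + boundary
-- indices first, then slice between consecutive boundaries (objective: alternative decomposition).


-- ===== PORT A =====
-- loop body of A: state (final_list, cur_name)
def pvStepA (acc : List String × List String) (name : String) : List String × List String :=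
  -- has_comma = ',' == name[-1]  (name[-1] raises IndexError on "", excluded by Pre_)
  let has_comma := PySem.Str.pyGet? name (-1) == some ','
  let cur := acc.2 ++ [PySem.Str.replace name "," ""]
  if has_comma then (acc.1 ++ [PySem.Str.join " " cur], [])
  else (acc.1, cur)

def create_player_list (names : Option (List String)) : Option (List String) :=
  match names with
  | none => none
  | some ns =>
    let st := ns.foldl pvStepA ([], [])
    some (st.1 ++ [PySem.Str.join " " st.2])

-- ===== PORT B =====
-- pass-1 body of B: state (cleaned, boundaries), element (i, name)
def pvStepB1 (acc : List String × List Int) (iname : Int × String) : List String × List Int :=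
  let bs := if PySem.Str.pyGet? iname.2 (-1) == some ',' then acc.2 ++ [iname.1] else acc.2
  (acc.1 ++ [PySem.Str.replace iname.2 "," ""], bs)

-- pass-2 body of B: state (final_list, prev), element a boundary index b
def pvStepB2 (cleaned : List String) (acc : List String × Int) (b : Int) : List String × Int :=
  (acc.1 ++ [PySem.Str.join " " (PySem.List.slice cleaned (some acc.2) (some (b + 1)))], b + 1)

def create_player_list_alt (names : Option (List String)) : Option (List String) :=
  match names with
  | none => none
  | some ns =>
    let p := (PySem.List.enumerate ns 0).foldl pvStepB1 ([], [])
    let q := p.2.foldl (pvStepB2 p.1) ([], 0)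
    some (q.1 ++ [PySem.Str.join " " (PySem.List.slice p.1 (some q.2) none)])

-- ===== PRECONDITION & SPEC =====
-- Pre_ excludes lists containing the empty string, on which Python A (name[-1]) raises IndexError.
def Pre_create_player_list (names : Option (List String)) : Prop :=
  ∀ s ∈ names.getD [], s ≠ ""
instance (names : Option (List String)) : Decidable (Pre_create_player_list names) := by
  unfold Pre_create_player_list; infer_instance
def pvWitness_create_player_list : Option (List String) := some ["daniel,", "steph", "curry"]

def Spec_create_player_list (names : Option (List String)) (out : Option (List String)) : Prop := out = create_player_list_alt names
instance (names : Option (List String)) (out : Option (List String)) : Decidable (Spec_create_player_list names out) := by unfold Spec_create_player_list; infer_instance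

-- ===== CLAIM (what is proved, stated in full; the proofs are below) =====
def Claim_equal_create_player_list : Prop := ∀ (names : Option (List String)), Dom_create_player_list names → Pre_create_player_list names → Spec_create_player_list names (create_player_list names)

-- ===== LEMMAS AND PROOFS =====

def pvClean (s : String) : String := PySem.Str.replace s "," ""

-- A's grouping as a structural recursion (cur = pending cleaned tokens)
def pvArec : List String → List String → List String
  | [], cur => [PySem.Str.join " " cur]
  | n :: t, cur =>
    if PySem.Str.pyGet? n (-1) == some ',' then
      PySem.Str.join " " (cur ++ [pvClean n]) :: pvArec t []
    else pvArec t (cur ++ [pvClean n])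

-- boundary indices of a token list, starting at index s
def pvBnds (s : Int) : List String → List Int
  | [] => []
  | n :: t => if PySem.Str.pyGet? n (-1) == some ',' then s :: pvBnds (s + 1) t
              else pvBnds (s + 1) t

theorem pvA_foldl (ns : List String) (fl cur : List String) :
    (ns.foldl pvStepA (fl, cur)).1 ++ [PySem.Str.join " " (ns.foldl pvStepA (fl, cur)).2]
    = fl ++ pvArec ns cur := by
  induction ns generalizing fl cur with
  | nil => simp [pvArec]
  | cons n t ih =>
    by_cases h : PySem.List.pyGet? n.toList (-1) = some ','
    · simp [pvStepA, pvArec, pvClean, h, ih]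
    · simp [pvStepA, pvArec, pvClean, h, ih]

theorem pvB_pass1 (ns : List String) (s : Int) (cl : List String) (bs : List Int) :
    (PySem.List.enumerate ns s).foldl pvStepB1 (cl, bs)
    = (cl ++ ns.map pvClean, bs ++ pvBnds s ns) := by
  induction ns generalizing s cl bs with
  | nil => simp [PySem.List.enumerate_nil, pvBnds]
  | cons n t ih =>
    rw [PySem.List.enumerate_cons]
    by_cases h : PySem.List.pyGet? n.toList (-1) = some ','
    · simp [pvStepB1, pvBnds, pvClean, h, ih]
    · simp [pvStepB1, pvBnds, pvClean, h, ih]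

-- main invariant for B's second pass: `done` is the consumed prefix of cleaned,
-- `pend` the pending cleaned tokens (A's cur_name), t the remaining raw tokens.
theorem pvB_pass2 (t : List String) (done pend fl : List String) :
    (let cleaned := done ++ pend ++ t.map pvClean
     let q := (pvBnds ((done.length : Int) + (pend.length : Int)) t).foldl
       (pvStepB2 cleaned) (fl, (done.length : Int))
     q.1 ++ [PySem.Str.join " " (PySem.List.slice cleaned (some q.2) none)])
    = fl ++ pvArec t pend := by
  induction t generalizing done pend fl with
  | nil =>
    simp only [List.map_nil, List.append_nil, pvBnds, List.foldl_nil, pvArec]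
    rw [PySem.List.slice_from_natCast, List.drop_left]
  | cons n t ih =>
    by_cases h : PySem.Str.pyGet? n (-1) == some ','
    · simp only [List.map_cons, pvBnds, pvArec, h, if_true, List.foldl_cons, pvStepB2]
      have hsl : PySem.List.slice (done ++ pend ++ (pvClean n :: t.map pvClean))
          (some (done.length : Int)) (some (((done.length : Int) + (pend.length : Int)) + 1))
          = pend ++ [pvClean n] := by
        have hc : ((done.length : Int) + (pend.length : Int)) + 1
            = ((done.length + pend.length + 1 : Nat) : Int) := by push_cast; ring
        rw [hc, PySem.List.slice_natCast, List.append_assoc, List.drop_left]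
        have h2 : done.length + pend.length + 1 - done.length = pend.length + 1 := by omega
        rw [h2, show pend ++ pvClean n :: t.map pvClean
              = (pend ++ [pvClean n]) ++ t.map pvClean by simp,
           List.take_left' (by simp)]
      rw [hsl]
      have hl : (((done ++ pend ++ [pvClean n]).length : Nat) : Int)
          = (done.length : Int) + (pend.length : Int) + 1 := by
        push_cast [List.length_append, List.length_singleton]; ring
      have key := ih (done ++ pend ++ [pvClean n]) []
        (fl ++ [PySem.Str.join " " (pend ++ [pvClean n])])
      simp only [List.append_nil, List.length_nil, Nat.cast_zero, add_zero, hl] at key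
      rw [show done ++ pend ++ (pvClean n :: t.map pvClean)
            = (done ++ pend ++ [pvClean n]) ++ t.map pvClean by simp]
      rw [key]
      simp
    · simp only [List.map_cons, pvBnds, pvArec, h, Bool.false_eq_true, if_false]
      have hp : (((pend ++ [pvClean n]).length : Nat) : Int) = (pend.length : Int) + 1 := by
        push_cast [List.length_append, List.length_singleton]; ring
      have key := ih done (pend ++ [pvClean n]) fl
      simp only [hp, ← add_assoc] at key
      rw [show done ++ pend ++ (pvClean n :: t.map pvClean)
            = done ++ (pend ++ [pvClean n]) ++ t.map pvClean by simp]
      exact key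

-- ===== VERDICT (by name: the statement is the Claim_ definition above) =====
theorem create_player_list_spec : Claim_equal_create_player_list := by
  intro names _ _
  unfold Spec_create_player_list create_player_list create_player_list_alt
  cases names with
  | none => rfl
  | some ns =>
    simp only [pvB_pass1 ns 0 [] [], List.nil_append]
    have h2 := pvB_pass2 ns [] [] []
    simp only [List.length_nil, Nat.cast_zero, List.nil_append, add_zero] at h2
    rw [h2, pvA_foldl ns [] []]
    simp
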